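-- pv_equiv track=rewrite | github.com/william-c-stanford/Latent-Space-Reasoning | src/latent_reasoning/eval/arc_agi2.py | rows_match_prefix
-- ===== SOURCE A (Python) =====
-- from typing import List, Dict, Any, Optional, Tuple
--
-- def rows_match_prefix(predicted: Optional[List[List[int]]], expected: Optional[List[List[int]]]) -> bool:
--     """Check if predicted rows match the beginning of expected (for truncated outputs)."""
--     if predicted is None or expected is None:
--         return False
--
--     if not predicted:
--         return False
--
--     # Check if all predicted rows match the corresponding expected rows
--     for i, pred_row in enumerate(predicted):
--         if i >= len(expected):
--             return False
--         if pred_row != expected[i]: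
--             return False
--
--     return True
-- ===== SOURCE B (Python) =====
-- def rows_match_prefix(predicted, expected):
--     """Check if predicted rows match the beginning of expected (for truncated outputs)."""
--     return bool(predicted) and expected is not None and predicted == expected[:len(predicted)]
-- ===== Notes on version B (the rewrite author's own statement) =====
-- stated objective: idiomatic
-- what changed: Replaced the enumerated per-row loop with index bounds checks by a single slice-and-compare: predicted == expected[:len(predicted)], guarded by the truthiness/None checks.
import Mathlib
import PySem

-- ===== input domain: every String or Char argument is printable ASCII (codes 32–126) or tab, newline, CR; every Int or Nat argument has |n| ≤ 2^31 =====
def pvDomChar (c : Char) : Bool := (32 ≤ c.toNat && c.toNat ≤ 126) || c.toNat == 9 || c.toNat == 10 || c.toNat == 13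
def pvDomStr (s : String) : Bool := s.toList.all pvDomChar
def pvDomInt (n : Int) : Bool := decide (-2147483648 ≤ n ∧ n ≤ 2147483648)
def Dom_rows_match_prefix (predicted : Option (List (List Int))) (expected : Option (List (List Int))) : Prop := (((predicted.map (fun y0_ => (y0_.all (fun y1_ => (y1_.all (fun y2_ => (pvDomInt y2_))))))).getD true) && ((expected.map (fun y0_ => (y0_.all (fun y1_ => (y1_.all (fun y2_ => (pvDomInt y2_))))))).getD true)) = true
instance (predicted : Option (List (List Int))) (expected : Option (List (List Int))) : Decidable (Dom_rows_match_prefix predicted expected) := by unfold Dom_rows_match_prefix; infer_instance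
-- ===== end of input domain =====

-- B replaces A's enumerated per-row loop by a single prefix slice comparison (idiomatic; same cost).


-- ===== PORT A =====
-- A's enumerate loop: index i over predicted rows, bounds check then row comparison
def rowsLoopA (e : List (List Int)) : Int → List (List Int) → Bool
  | _, [] => true
  | i, r :: rs =>
    if i ≥ (e.length : Int) then false
    else if PySem.List.pyGet? e i ≠ some r then false
    else rowsLoopA e (i + 1) rs

def rows_match_prefix (predicted : Option (List (List Int))) (expected : Option (List (List Int))) : Bool :=
  match predicted, expected with
  | none, _ => false
  | _, none => false
  | some p, some e =>
    if p = [] then false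
    else rowsLoopA e 0 p

-- ===== PORT B =====
-- B: bool(predicted) and expected is not None and predicted == expected[:len(predicted)]
def rows_match_prefix_alt (predicted : Option (List (List Int))) (expected : Option (List (List Int))) : Bool :=
  (match predicted with | some (_ :: _) => true | _ => false) &&
  expected.isSome &&
  decide (predicted.getD [] =
    PySem.List.slice (expected.getD []) none (some ((predicted.getD []).length : Int)))

-- ===== PRECONDITION & SPEC =====
def Spec_rows_match_prefix (predicted : Option (List (List Int))) (expected : Option (List (List Int))) (out : Bool) : Prop := out = rows_match_prefix_alt predicted expected
instance (predicted : Option (List (List Int))) (expected : Option (List (List Int))) (out : Bool) : Decidable (Spec_rows_match_prefix predicted expected out) := by unfold Spec_rows_match_prefix; infer_instance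

-- ===== CLAIM (what is proved, stated in full; the proofs are below) =====
def Claim_equal_rows_match_prefix : Prop := ∀ (predicted : Option (List (List Int))) (expected : Option (List (List Int))), Dom_rows_match_prefix predicted expected → Spec_rows_match_prefix predicted expected (rows_match_prefix predicted expected)

-- ===== LEMMAS AND PROOFS =====

-- ===== VERDICT (by name: the statement is the Claim_ definition above) =====
lemma rowsLoopA_eq (p : List (List Int)) : ∀ (e : List (List Int)) (i : Nat),
    rowsLoopA e (i : Int) p = decide (p = (e.drop i).take p.length) := by
  induction p with
  | nil => intro e i; simp [rowsLoopA]
  | cons r rs ih =>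
    intro e i
    by_cases hle : (i : Int) ≥ (e.length : Int)
    · have h : e.length ≤ i := by exact_mod_cast hle
      rw [rowsLoopA, if_pos hle, List.drop_eq_nil_of_le h]
      simp
    · have hlt : i < e.length := by omega
      have hget : PySem.List.pyGet? e (i : Int) = some e[i] := by
        simp [PySem.List.pyGet?, PySem.List.pyIdx?, hlt]
      have hdrop : e.drop i = e[i] :: e.drop (i + 1) := List.drop_eq_getElem_cons hlt
      by_cases hr : e[i] = r
      · have : ((i : Int) + 1) = ((i + 1 : Nat) : Int) := by push_cast; ring
        rw [rowsLoopA, if_neg hle, if_neg (by simp [hget, hr]), this, ih e (i + 1)]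
        simp [hdrop, hr]
      · rw [rowsLoopA, if_neg hle, if_pos (by simp [hget, hr])]
        rw [hdrop, List.length_cons, List.take_succ_cons]
        symm
        simp only [decide_eq_false_iff_not, List.cons.injEq, not_and]
        intro h; exact absurd h.symm hr

theorem rows_match_prefix_spec : Claim_equal_rows_match_prefix := by
  intro predicted expected _
  unfold Spec_rows_match_prefix
  cases predicted with
  | none =>
    cases expected <;> simp only [rows_match_prefix, rows_match_prefix_alt, Bool.false_and]
  | some p =>
    cases expected with
    | none =>
      simp only [rows_match_prefix, rows_match_prefix_alt, Option.isSome_none, Bool.and_false,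
        Bool.false_and]
    | some e =>
      cases p with
      | nil => simp [rows_match_prefix, rows_match_prefix_alt]
      | cons r rs =>
        simp only [rows_match_prefix, rows_match_prefix_alt, Option.getD_some, Option.isSome_some,
          Bool.true_and, if_neg (List.cons_ne_nil r rs)]
        rw [show ((0 : Int)) = ((0 : Nat) : Int) from rfl, rowsLoopA_eq (r :: rs) e 0,
          ]
        simp only [PySem.List.slice_to_natCast, List.drop_zero, decide_eq_decide]
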